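-- pv_equiv track=rewrite | github.com/alex-cobb/spowtd | src/spowtd/fit_offsets.py | split_mapping_by_keys
-- ===== SOURCE A (Python) =====
-- def split_mapping_by_keys(mapping, key_lists):
--     """Split up a mapping (dict) according to connected components
--
--     Each connected component is a sequence of keys from mapping; returns a corresponding
--     sequence of head mappings, each with only the keys from that connected component.
--
--     """
--     mappings = []
--     for seq in key_lists:
--         mappings.append(
--             dict(
--                 (head_id, value)
--                 for head_id, value in list(mapping.items())
--                 if head_id in seq
--             )
--         )
--     return mappings
-- ===== SOURCE B (Python) =====
-- def split_mapping_by_keys(mapping, key_lists):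
--     """Split up a mapping (dict) according to connected components
--
--     Builds an inverted index key -> list of bucket indices once, then a
--     single pass over the mapping assigns each item to its buckets by
--     index lookup; no membership scans of the key lists.
--     """
--     index = {}
--     for i, seq in enumerate(key_lists):
--         for k in seq:
--             index.setdefault(k, []).append(i)
--     buckets = [{} for _ in key_lists]
--     for k, v in mapping.items():
--         for i in index.get(k, ()):
--             buckets[i][k] = v
--     return buckets
-- ===== Notes on version B (the rewrite author's own statement) =====
-- stated objective: faster
-- what changed: B builds an inverted index (key -> bucket indices) from the key lists once, then a single pass over the mapping assigns each item to its buckets by dict lookup, removing A's per-key-list scan of the mapping and its inner 'head_id in seq' list-membership test.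
import Mathlib
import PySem

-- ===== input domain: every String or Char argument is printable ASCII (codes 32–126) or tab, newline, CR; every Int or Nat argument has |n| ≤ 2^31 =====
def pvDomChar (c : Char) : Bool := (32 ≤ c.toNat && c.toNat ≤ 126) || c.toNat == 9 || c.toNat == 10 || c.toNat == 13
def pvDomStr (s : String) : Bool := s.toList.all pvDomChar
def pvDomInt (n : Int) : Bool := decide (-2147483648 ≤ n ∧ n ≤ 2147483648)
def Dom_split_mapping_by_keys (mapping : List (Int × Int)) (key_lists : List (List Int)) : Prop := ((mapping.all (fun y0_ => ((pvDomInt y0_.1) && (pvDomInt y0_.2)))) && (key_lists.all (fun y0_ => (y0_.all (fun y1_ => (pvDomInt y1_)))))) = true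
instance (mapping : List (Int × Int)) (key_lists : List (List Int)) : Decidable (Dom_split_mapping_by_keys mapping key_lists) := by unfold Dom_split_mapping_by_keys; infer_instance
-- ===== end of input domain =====

-- B builds an inverted index (key -> bucket indices) once and fills all buckets in one
-- pass over the mapping by index lookup, instead of A's scan of the whole mapping with
-- an inner 'head_id in seq' membership test for every key list.

-- ===== PORT A =====
-- for seq in key_lists: append dict((h, v) for (h, v) in mapping.items() if h in seq)
def split_mapping_by_keys (mapping : List (Int × Int)) (key_lists : List (List Int)) : List (List (Int × Int)) :=
  key_lists.foldl
    (fun mappings seq =>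
      mappings ++
        [(mapping.foldl
            (fun d p => if p.1 ∈ seq then d.insert p.1 p.2 else d)
            (PySem.Dict.empty : PySem.Dict Int Int)).items])
    []

-- ===== PORT B =====
-- index = {}; for i, seq in enumerate(key_lists): for k in seq: index.setdefault(k, []).append(i)
--   (setdefault + in-place append of the stored list = re-insert the appended list at k; dict order unchanged — exact)
-- buckets = [{} for _ in key_lists]
-- for k, v in mapping.items(): for i in index.get(k, ()): buckets[i][k] = v
def split_mapping_by_keys_alt (mapping : List (Int × Int)) (key_lists : List (List Int)) : List (List (Int × Int)) :=
  let index : PySem.Dict Int (List Int) :=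
    (PySem.List.enumerate key_lists).foldl
      (fun d q => q.2.foldl (fun d k => d.insert k (d.getD k [] ++ [q.1])) d)
      PySem.Dict.empty
  let buckets : List (PySem.Dict Int Int) := key_lists.map (fun _ => (PySem.Dict.empty : PySem.Dict Int Int))
  (mapping.foldl
      (fun bs p =>
        (index.getD p.1 []).foldl
          (fun bs i =>
            PySem.List.pySetD bs i ((PySem.List.pyGetD bs i PySem.Dict.empty).insert p.1 p.2))
          bs)
      buckets).map (fun d => d.items)

-- ===== PRECONDITION & SPEC =====
def Spec_split_mapping_by_keys (mapping : List (Int × Int)) (key_lists : List (List Int)) (out : List (List (Int × Int))) : Prop := out = split_mapping_by_keys_alt mapping key_lists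
instance (mapping : List (Int × Int)) (key_lists : List (List Int)) (out : List (List (Int × Int))) : Decidable (Spec_split_mapping_by_keys mapping key_lists out) := by unfold Spec_split_mapping_by_keys; infer_instance

-- ===== CLAIM (what is proved, stated in full; the proofs are below) =====
def Claim_equal_split_mapping_by_keys : Prop := ∀ (mapping : List (Int × Int)) (key_lists : List (List Int)), Dom_split_mapping_by_keys mapping key_lists → Spec_split_mapping_by_keys mapping key_lists (split_mapping_by_keys mapping key_lists)

-- ===== LEMMAS AND PROOFS =====

-- the per-sequence index-building fold, read through getD at any key
lemma idx_inner (k i : Int) :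
    ∀ (seq : List Int) (d : PySem.Dict Int (List Int)),
      (seq.foldl (fun d k' => d.insert k' (d.getD k' [] ++ [i])) d).getD k []
        = d.getD k [] ++ List.replicate (seq.count k) i := by
  intro seq
  induction seq with
  | nil => intro d; simp
  | cons k' rest ih =>
      intro d
      simp only [List.foldl_cons, ih]
      by_cases h : k' = k
      · subst h
        simp [PySem.Dict.getD_insert_self, List.replicate_succ]
      · rw [PySem.Dict.getD_insert_of_ne _ _ _ (Ne.symm h)]
        simp [h]

-- the whole index, read through getD at any key
lemma idx_outer (k : Int) :
    ∀ (ls : List (List Int)) (s : Int) (d : PySem.Dict Int (List Int)),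
      ((PySem.List.enumerate ls s).foldl
          (fun d q => q.2.foldl (fun d k' => d.insert k' (d.getD k' [] ++ [q.1])) d) d).getD k []
        = d.getD k [] ++
            (PySem.List.enumerate ls s).flatMap (fun q => List.replicate (q.2.count k) q.1) := by
  intro ls
  induction ls with
  | nil => intro s d; simp [PySem.List.enumerate]
  | cons seq rest ih =>
      intro s d
      rw [PySem.List.enumerate_cons]
      simp only [List.foldl_cons, List.flatMap_cons]
      rw [ih, idx_inner, List.append_assoc]

-- membership in the flattened index list at key k
lemma idx_mem (k : Int) :
    ∀ (ls : List (List Int)) (s i : Int),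
      (i ∈ (PySem.List.enumerate ls s).flatMap (fun q => List.replicate (q.2.count k) q.1))
        ↔ ∃ j : Nat, ∃ h : j < ls.length, i = s + (j : Int) ∧ k ∈ ls[j] := by
  intro ls
  induction ls with
  | nil => intro s i; simp [PySem.List.enumerate]
  | cons seq rest ih =>
      intro s i
      rw [PySem.List.enumerate_cons]
      simp only [List.flatMap_cons, List.mem_append, List.mem_replicate, ih]
      constructor
      · rintro (⟨hc, rfl⟩ | ⟨j, hj, rfl, hk⟩)
        · exact ⟨0, by simp, by simp,
            by simpa using List.count_pos_iff.mp (Nat.pos_of_ne_zero hc)⟩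
        · exact ⟨j + 1, by simp; omega, by push_cast; ring, by simpa using hk⟩
      · rintro ⟨j, hj, rfl, hk⟩
        cases j with
        | zero =>
            refine Or.inl ⟨fun h0 => (List.count_eq_zero.mp h0) (by simpa using hk), by simp⟩
        | succ j =>
            refine Or.inr ⟨j, by simp at hj; omega, by push_cast; ring, by simpa using hk⟩

-- lengths are preserved by the bucket-assignment fold
lemma assign_length (k v : Int) (L : List Int) :
    ∀ (bs : List (PySem.Dict Int Int)),
      (L.foldl (fun bs i =>
          PySem.List.pySetD bs i ((PySem.List.pyGetD bs i PySem.Dict.empty).insert k v)) bs).length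
        = bs.length := by
  induction L with
  | nil => intro bs; rfl
  | cons i L ih => intro bs; simp [ih, PySem.List.length_pySetD]

-- effect of the bucket-assignment fold on each bucket
lemma assign_get (k v : Int) :
    ∀ (L : List Int) (bs : List (PySem.Dict Int Int)),
      (∀ i ∈ L, 0 ≤ i ∧ i < (bs.length : Int)) →
      ∀ j : Nat,
        (L.foldl (fun bs i =>
            PySem.List.pySetD bs i ((PySem.List.pyGetD bs i PySem.Dict.empty).insert k v)) bs)[j]?
          = if (j : Int) ∈ L then (bs[j]?).map (fun d => d.insert k v) else bs[j]? := by
  intro L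
  induction L with
  | nil => intro bs _ j; simp
  | cons i L ih =>
      intro bs hb j
      obtain ⟨hi0, hilt⟩ := hb i (List.mem_cons_self ..)
      have hkn : i.toNat < bs.length := by omega
      have hset : PySem.List.pySetD bs i ((PySem.List.pyGetD bs i PySem.Dict.empty).insert k v)
          = bs.set i.toNat ((bs[i.toNat]).insert k v) := by
        rw [PySem.List.pySetD_of_nonneg _ _ hi0,
          PySem.List.pyGetD_eq_getElem _ _ hi0 (by simpa using hilt)]
      simp only [List.foldl_cons, hset]
      rw [ih _ (by
        intro x hx
        have hx' := hb x (List.mem_cons_of_mem _ hx)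
        simpa using hx') j]
      by_cases hji : (j : Int) = i
      · have hj : i.toNat = j := by omega
        simp only [hj] at hset hkn ⊢
        rw [hji]
        by_cases hjL : i ∈ L
        · rw [if_pos hjL, if_pos (List.mem_cons_self ..), List.getElem?_set_self hkn,
            List.getElem?_eq_getElem hkn]
          simp [PySem.Dict.insert_insert_self]
        · rw [if_neg hjL, if_pos (List.mem_cons_self ..), List.getElem?_set_self hkn,
            List.getElem?_eq_getElem hkn]
          simp
      · have hne : i.toNat ≠ j := by omega
        simp only [List.getElem?_set_ne hne]
        by_cases hjL : (j : Int) ∈ L <;> simp [List.mem_cons, hjL, hji]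

-- the single pass over the mapping computes, bucket by bucket, A's per-list fold
lemma pass_get (key_lists : List (List Int)) :
    ∀ (m : List (Int × Int)) (bs : List (PySem.Dict Int Int)), bs.length = key_lists.length →
      ∀ (j : Nat) (hj : j < key_lists.length),
        (m.foldl
            (fun bs p =>
              (((PySem.List.enumerate key_lists).foldl
                  (fun d q => q.2.foldl (fun d k' => d.insert k' (d.getD k' [] ++ [q.1])) d)
                  PySem.Dict.empty).getD p.1 []).foldl
                (fun bs i =>
                  PySem.List.pySetD bs i ((PySem.List.pyGetD bs i PySem.Dict.empty).insert p.1 p.2))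
                bs)
            bs)[j]?
          = (bs[j]?).map
              (fun d => m.foldl (fun d p => if p.1 ∈ key_lists[j] then d.insert p.1 p.2 else d) d) := by
  intro m
  induction m with
  | nil => intro bs _ j hj; simp
  | cons p m ih =>
      intro bs hlen j hj
      have hL : ((PySem.List.enumerate key_lists).foldl
            (fun d q => q.2.foldl (fun d k' => d.insert k' (d.getD k' [] ++ [q.1])) d)
            PySem.Dict.empty).getD p.1 []
          = (PySem.List.enumerate key_lists).flatMap
              (fun q => List.replicate (q.2.count p.1) q.1) := by
        rw [idx_outer]; simp
      have hmem : ∀ i, (i ∈ ((PySem.List.enumerate key_lists).foldl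
            (fun d q => q.2.foldl (fun d k' => d.insert k' (d.getD k' [] ++ [q.1])) d)
            PySem.Dict.empty).getD p.1 [])
          ↔ ∃ j' : Nat, ∃ h : j' < key_lists.length, i = (j' : Int) ∧ p.1 ∈ key_lists[j'] := by
        intro i
        rw [hL, idx_mem]
        simp
      simp only [List.foldl_cons]
      rw [ih _ (by rw [assign_length, hlen]) j hj,
        assign_get p.1 p.2 _ bs (by
          intro i hi
          obtain ⟨j', hj', rfl, _⟩ := (hmem i).1 hi
          constructor <;> [positivity; exact_mod_cast hlen ▸ hj'])]
      by_cases hin : p.1 ∈ key_lists[j]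
      · rw [if_pos ((hmem (j : Int)).2 ⟨j, hj, rfl, hin⟩)]
        simp [hin, Option.map_map, Function.comp_def]
      · rw [if_neg (by
          intro h
          obtain ⟨j', hj', hjj, hk⟩ := (hmem (j : Int)).1 h
          have : j' = j := by omega
          exact hin (this ▸ hk))]
        simp [hin]

-- the single pass also preserves the number of buckets
lemma pass_length (key_lists : List (List Int)) :
    ∀ (m : List (Int × Int)) (bs : List (PySem.Dict Int Int)),
      (m.foldl
          (fun bs p =>
            (((PySem.List.enumerate key_lists).foldl
                (fun d q => q.2.foldl (fun d k' => d.insert k' (d.getD k' [] ++ [q.1])) d)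
                PySem.Dict.empty).getD p.1 []).foldl
              (fun bs i =>
                PySem.List.pySetD bs i ((PySem.List.pyGetD bs i PySem.Dict.empty).insert p.1 p.2))
              bs)
          bs).length = bs.length := by
  intro m
  induction m with
  | nil => intro bs; rfl
  | cons p m ih => intro bs; rw [List.foldl_cons, ih, assign_length]

theorem split_aux (mapping : List (Int × Int)) (key_lists : List (List Int)) :
    split_mapping_by_keys mapping key_lists = split_mapping_by_keys_alt mapping key_lists := by
  unfold split_mapping_by_keys split_mapping_by_keys_alt
  rw [PySem.List.foldl_append_singleton_eq_map]
  apply List.ext_getElem?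
  intro j
  by_cases hj : j < key_lists.length
  · rw [List.getElem?_map, pass_get key_lists mapping _ (by simp) j hj]
    simp [List.getElem?_eq_getElem hj]
    exact ⟨PySem.Dict.empty, by simp [hj], rfl⟩
  · have h1 : key_lists.length ≤ j := by omega
    rw [List.getElem?_eq_none (by simpa using h1),
      List.getElem?_eq_none (by
        rw [List.length_map, pass_length]
        simpa using h1)]

-- ===== VERDICT (by name: the statement is the Claim_ definition above) =====
theorem split_mapping_by_keys_spec : Claim_equal_split_mapping_by_keys := by
  intro mapping key_lists _
  exact split_aux mapping key_lists
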